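-- pv_equiv track=rewrite | github.com/nixonwidjaja/advent-of-code-2023 | day14/main.py | solve
-- ===== SOURCE A (Python) =====
-- def solve(graph):
--     n, m = len(graph), len(graph[0])
--     ans = 0
--     for j in range(m):
--         base = 0
--         for i in range(n):
--             if graph[i][j] == "O":
--                 ans += n - base
--                 base += 1
--             elif graph[i][j] == "#":
--                 base = i + 1
--     return ans
-- ===== SOURCE B (Python) =====
-- def seg_sum(top, c):
--     # load of c rocks stacked at the top of a free span whose first row has load `top`
--     return sum(range(top - c + 1, top + 1))
--
--
-- def col_load(col, start, n):
--     # recursive split of the column at the first '#': rocks before it stack at `start`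
--     if "#" in col:
--         k = col.index("#")
--         c = col[:k].count("O")
--         return seg_sum(n - start, c) + col_load(col[k + 1:], start + k + 1, n)
--     return seg_sum(n - start, col.count("O"))
--
--
-- def solve(graph):
--     n = len(graph)
--     total = 0
--     for j in range(len(graph[0])):
--         total += col_load([row[j] for row in graph], 0, n)
--     return total
-- ===== Notes on version B (the rewrite author's own statement) =====
-- stated objective: alternative
-- what changed: Instead of A's per-cell state machine with a running base over index loops, B extracts each column, recursively splits it at the first '#' via index() and slicing, counts the rocks of each segment with count('O'), and scores the segment as sum(range(...)).
import Mathlib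
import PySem

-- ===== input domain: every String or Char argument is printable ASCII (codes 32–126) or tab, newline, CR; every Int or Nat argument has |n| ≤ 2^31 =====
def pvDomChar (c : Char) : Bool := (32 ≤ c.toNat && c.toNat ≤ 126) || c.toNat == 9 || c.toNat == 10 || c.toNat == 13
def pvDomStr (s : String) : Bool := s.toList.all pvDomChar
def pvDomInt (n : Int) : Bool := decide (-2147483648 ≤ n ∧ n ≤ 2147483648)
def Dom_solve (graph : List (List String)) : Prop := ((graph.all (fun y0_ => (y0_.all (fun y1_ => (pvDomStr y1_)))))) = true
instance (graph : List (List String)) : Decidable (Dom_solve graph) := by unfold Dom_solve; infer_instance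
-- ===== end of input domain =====

-- B replaces A's per-cell state machine (running base over index loops) by extracting each
-- column and recursively splitting it at the first '#', scoring each segment from its rock
-- count (objective: alternative decomposition, same asymptotic cost).

-- ===== PORT A =====
def solve (graph : List (List String)) : Int :=
  let n : Int := (graph.length : Int)
  let m : Int := ((PySem.List.pyGetD graph 0 []).length : Int)
  (PySem.List.pyRange 0 m 1).foldl (fun ans j =>
    ((PySem.List.pyRange 0 n 1).foldl (fun (p : Int × Int) i =>
      if PySem.List.pyGetD (PySem.List.pyGetD graph i []) j "" = "O" then
        (p.1 + (n - p.2), p.2 + 1)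
      else if PySem.List.pyGetD (PySem.List.pyGetD graph i []) j "" = "#" then
        (p.1, i + 1)
      else p) (ans, 0)).1) 0

-- ===== PORT B =====
-- seg_sum(top, c) = sum(range(top - c + 1, top + 1))
def segSum (top c : Int) : Int :=
  (PySem.List.pyRange (top - c + 1) (top + 1) 1).sum

-- col_load(col, start, n): split at the first '#' (col.index), score col[:k].count('O')
def colLoad (col : List String) (start n : Int) : Int :=
  match h : PySem.List.index? col "#" with
  | some k =>
      segSum (n - start) ((PySem.List.count (PySem.List.slice col none (some (k : Int))) "O" : Int))
      + colLoad (PySem.List.slice col (some ((k : Int) + 1)) none) (start + (k : Int) + 1) n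
  | none => segSum (n - start) ((PySem.List.count col "O" : Int))
termination_by col.length
decreasing_by
  obtain ⟨hk, -, -⟩ := PySem.List.getElem_of_index?_eq_some h
  have : ((k : Int) + 1) = ((k + 1 : Nat) : Int) := by push_cast; ring
  rw [this, PySem.List.slice_from_natCast]
  simp [List.length_drop]
  omega

def solve_alt (graph : List (List String)) : Int :=
  let n : Int := (graph.length : Int)
  (PySem.List.pyRange 0 ((PySem.List.pyGetD graph 0 []).length : Int) 1).foldl
    (fun total j =>
      total + colLoad (graph.map (fun row => PySem.List.pyGetD row j "")) 0 n) 0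

-- ===== PRECONDITION & SPEC =====
-- Pre_ excludes inputs where Python A raises IndexError: the empty grid (graph[0])
-- and grids with a row shorter than the first row (graph[i][j]).
def Pre_solve (graph : List (List String)) : Prop :=
  graph ≠ [] ∧ ∀ r ∈ graph, graph.headI.length ≤ r.length
instance (graph : List (List String)) : Decidable (Pre_solve graph) := by
  unfold Pre_solve; infer_instance

def pvWitness_solve : List (List String) := [["O", "."], ["#", "O"]]

def Spec_solve (graph : List (List String)) (out : Int) : Prop := out = solve_alt graph
instance (graph : List (List String)) (out : Int) : Decidable (Spec_solve graph out) := by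
  unfold Spec_solve; infer_instance

-- ===== CLAIM (what is proved, stated in full; the proofs are below) =====
def Claim_equal_solve : Prop :=
  ∀ (graph : List (List String)), Dom_solve graph → Pre_solve graph → Spec_solve graph (solve graph)

-- ===== LEMMAS AND PROOFS =====

-- A's inner loop as structural recursion over the column cells (i = absolute row index)
def aCol : List String → Int → Int → Int → Int → Int
  | [], _, _, ans, _ => ans
  | cell :: rest, n, i, ans, base =>
    if cell = "O" then aCol rest n (i + 1) (ans + (n - base)) (base + 1)
    else if cell = "#" then aCol rest n (i + 1) ans (i + 1)
    else aCol rest n (i + 1) ans base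

theorem segSum_zero (t : Int) : segSum t 0 = 0 := by
  simp [segSum, PySem.List.pyRange_one_eq_nil]

theorem segSum_succ (t c : Int) (hc : 0 ≤ c) : segSum t (c + 1) = segSum (t - 1) c + t := by
  unfold segSum
  have h1 : t - (c + 1) + 1 = t - 1 - c + 1 := by ring
  have h2 : t + 1 = (t) + 1 := rfl
  rw [h1, PySem.List.pyRange_one_succ_right (by omega)]
  simp

theorem aCol_add (col : List String) (n : Int) :
    ∀ (i ans base : Int), aCol col n i ans base = ans + aCol col n i 0 base := by
  induction col with
  | nil => intro i ans base; simp [aCol]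
  | cons cell rest ih =>
      intro i ans base
      simp only [aCol]
      split_ifs with hO hH
      · rw [ih (i+1) (ans + (n - base)), ih (i+1) (0 + (n - base))]; ring
      · rw [ih (i+1) ans]
      · exact ih (i+1) ans base

-- processing a '#'-free prefix accrues exactly the segment sum
theorem aCol_seg (n : Int) :
    ∀ (seg : List String), "#" ∉ seg → ∀ (rest : List String) (i ans base : Int),
    aCol (seg ++ rest) n i ans base
      = aCol rest n (i + seg.length) (ans + segSum (n - base) (seg.count "O")) (base + seg.count "O") := by
  intro seg
  induction seg with
  | nil => intro _ rest i ans base; simp [segSum_zero]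
  | cons cell tail ih =>
      intro hmem rest i ans base
      have hH : cell ≠ "#" := fun h => hmem (by simp [h])
      have htail : "#" ∉ tail := fun h => hmem (by simp [h])
      by_cases hO : cell = "O"
      · simp only [List.cons_append, aCol, if_pos hO]
        rw [ih htail rest (i+1) (ans + (n - base)) (base + 1)]
        have hc : (0:Int) ≤ (tail.count "O" : Int) := Int.natCast_nonneg _
        have h1 : i + 1 + (tail.length : Int) = i + ((cell :: tail).length : Int) := by
          push_cast [List.length_cons]; ring
        have hcnt : (((cell :: tail).count "O" : Nat) : Int) = (tail.count "O" : Int) + 1 := by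
          simp [hO]
        have h2 : ans + (n - base) + segSum (n - (base + 1)) (tail.count "O")
            = ans + segSum (n - base) ((cell :: tail).count "O") := by
          rw [hcnt, segSum_succ _ _ hc]
          have : n - (base + 1) = n - base - 1 := by ring
          rw [this]; ring
        have h3 : base + 1 + (tail.count "O" : Int) = base + (((cell :: tail).count "O" : Nat) : Int) := by
          rw [hcnt]; ring
        rw [h1, h2, h3]
      · simp only [List.cons_append, aCol, if_neg hO, if_neg hH]
        rw [ih htail rest (i+1) ans base]
        have hcnt : (((cell :: tail).count "O" : Nat) : Int) = (tail.count "O" : Int) := by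
          simp [hO]
        have h1 : i + 1 + (tail.length : Int) = i + ((cell :: tail).length : Int) := by
          push_cast [List.length_cons]; ring
        rw [h1, hcnt]

-- the recursive splitter computes exactly A's per-cell scan (fresh segment: base = i)
theorem aCol_eq_colLoad (n : Int) :
    ∀ (col : List String) (i : Int), aCol col n i 0 i = colLoad col i n := by
  suffices H : ∀ (L : Nat) (col : List String), col.length = L → ∀ (i : Int),
      aCol col n i 0 i = colLoad col i n by
    intro col i; exact H col.length col rfl i
  intro L
  induction L using Nat.strong_induction_on with
  | _ L ih =>
    intro col hL i
    unfold colLoad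
    split
    next k heq =>
      obtain ⟨pre, suf, hcol, hk, hpre⟩ := (PySem.List.index?_eq_some_iff col "#" k).1 heq
      subst hcol
      subst hk
      have hslice1 : PySem.List.slice (pre ++ "#" :: suf) none (some (pre.length : Int)) = pre := by
        rw [PySem.List.slice_to_natCast, List.take_left]
      have hslice2 : PySem.List.slice (pre ++ "#" :: suf) (some ((pre.length : Int) + 1)) none = suf := by
        have hcast : ((pre.length : Int) + 1) = ((pre.length + 1 : Nat) : Int) := by push_cast; ring
        rw [hcast, PySem.List.slice_from_natCast]
        have h1 : pre ++ "#" :: suf = (pre ++ ["#"]) ++ suf := by simp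
        have h2 : pre.length + 1 = (pre ++ ["#"]).length := by simp
        rw [h1, h2]
        exact List.drop_left
      rw [hslice1, hslice2, PySem.List.count_eq]
      rw [aCol_seg n pre hpre ("#" :: suf) i 0 i, zero_add]
      have step : aCol ("#" :: suf) n (i + pre.length) (segSum (n - i) (pre.count "O")) (i + pre.count "O")
          = aCol suf n (i + pre.length + 1) (segSum (n - i) (pre.count "O")) (i + pre.length + 1) := by
        simp [aCol]
      have hsuf : aCol suf n (i + (pre.length : Int) + 1) 0 (i + (pre.length : Int) + 1)
          = colLoad suf (i + (pre.length : Int) + 1) n := by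
        apply ih suf.length _ suf rfl
        subst hL
        simp only [List.length_append, List.length_cons]
        omega
      rw [step, aCol_add, hsuf]
    next heq =>
      have hne : "#" ∉ col := (PySem.List.index?_eq_none_iff col "#").1 heq
      have := aCol_seg n col hne [] i 0 i
      simp only [List.append_nil, aCol] at this
      rw [this, PySem.List.count_eq]
      ring

-- A's inner index-fold equals aCol over the extracted column
theorem inner_eq_aCol (graph : List (List String)) (j : Int) :
    ∀ (i0 : Nat) (ans base : Int), i0 ≤ graph.length →
    ((PySem.List.pyRange (i0 : Int) (graph.length : Int) 1).foldl (fun (p : Int × Int) i =>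
      if PySem.List.pyGetD (PySem.List.pyGetD graph i []) j "" = "O" then
        (p.1 + ((graph.length : Int) - p.2), p.2 + 1)
      else if PySem.List.pyGetD (PySem.List.pyGetD graph i []) j "" = "#" then
        (p.1, i + 1)
      else p) (ans, base)).1
    = aCol ((graph.map (fun row => PySem.List.pyGetD row j "")).drop i0) (graph.length : Int) (i0 : Int) ans base := by
  suffices H : ∀ (d i0 : Nat), graph.length - i0 = d → i0 ≤ graph.length → ∀ (ans base : Int),
      ((PySem.List.pyRange (i0 : Int) (graph.length : Int) 1).foldl (fun (p : Int × Int) i =>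
        if PySem.List.pyGetD (PySem.List.pyGetD graph i []) j "" = "O" then
          (p.1 + ((graph.length : Int) - p.2), p.2 + 1)
        else if PySem.List.pyGetD (PySem.List.pyGetD graph i []) j "" = "#" then
          (p.1, i + 1)
        else p) (ans, base)).1
      = aCol ((graph.map (fun row => PySem.List.pyGetD row j "")).drop i0) (graph.length : Int) (i0 : Int) ans base by
    intro i0 ans base h; exact H (graph.length - i0) i0 rfl h ans base
  intro d
  induction d with
  | zero =>
      intro i0 hd hle ans base
      have hi : i0 = graph.length := by omega
      subst hi
      rw [PySem.List.pyRange_one_eq_nil (by omega)]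
      rw [List.drop_eq_nil_of_le (by simp)]
      simp [aCol]
  | succ d ihd =>
      intro i0 hd hle ans base
      have hlt : i0 < graph.length := by omega
      rw [PySem.List.pyRange_one_cons (by exact_mod_cast hlt)]
      simp only [List.foldl_cons]
      have hdrop : (graph.map (fun row => PySem.List.pyGetD row j "")).drop i0
          = PySem.List.pyGetD graph[i0] j ""
            :: (graph.map (fun row => PySem.List.pyGetD row j "")).drop (i0 + 1) := by
        rw [List.drop_eq_getElem_cons (by simpa using hlt)]
        simp
      rw [hdrop]
      have hcell : PySem.List.pyGetD graph ((i0 : Nat) : Int) [] = graph[i0] := by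
        rw [PySem.List.pyGetD_natCast]; exact List.getD_eq_getElem _ _ hlt
      simp only [aCol, hcell]
      have hcast : ((i0 : Int) + 1) = ((i0 + 1 : Nat) : Int) := by push_cast; ring
      by_cases hO : PySem.List.pyGetD graph[i0] j "" = "O"
      · simp only [if_pos hO]
        rw [hcast, ihd (i0 + 1) (by omega) (by omega)]
      · by_cases hH : PySem.List.pyGetD graph[i0] j "" = "#"
        · simp only [if_neg hO, if_pos hH]
          rw [hcast, ihd (i0 + 1) (by omega) (by omega)]
        · simp only [if_neg hO, if_neg hH]
          rw [hcast, ihd (i0 + 1) (by omega) (by omega)]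

theorem solve_eq_alt (graph : List (List String)) : solve graph = solve_alt graph := by
  show (PySem.List.pyRange 0 ((PySem.List.pyGetD graph 0 []).length : Int) 1).foldl _ 0
      = (PySem.List.pyRange 0 ((PySem.List.pyGetD graph 0 []).length : Int) 1).foldl _ 0
  congr 1
  funext ans j
  have h := inner_eq_aCol graph j 0 ans 0 (Nat.zero_le _)
  simp only [Nat.cast_zero, List.drop_zero] at h
  rw [h, aCol_add, aCol_eq_colLoad]

-- ===== VERDICT (by name: the statement is the Claim_ definition above) =====
theorem solve_spec : Claim_equal_solve := by
  intro graph _ _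
  unfold Spec_solve
  exact solve_eq_alt graph
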